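-- pv_equiv track=rewrite | github.com/cblades-tc/tcex | tcex/api/tc/utils/threat_intel_utils.py | safe_group_name
-- ===== SOURCE A (Python) =====
-- from typing import Dict, List, Optional
--
-- def safe_group_name(
--     group_name: str, group_max_length: Optional[int] = 100, ellipsis: Optional[bool] = True
-- ) -> str:
--     """Truncate group name to match limit breaking on space and optionally add an ellipsis.
--
--     .. note:: Currently the ThreatConnect group name limit is 100 characters.
--
--     Args:
--        group_name: The raw group name to be truncated.
--        group_max_length: The max length of the group name.
--        ellipsis: If true the truncated name will have '...' appended.
--
--     Returns:
--         (str): The truncated group name with optional ellipsis.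
--     """
--     ellipsis_value = ''
--     if ellipsis:
--         ellipsis_value = ' ...'
--
--     if group_name is not None and len(group_name) > group_max_length:
--         # split name by spaces and reset group_name
--         group_name_array = group_name.split(' ')
--         group_name = ''
--         for word in group_name_array:
--             word = f'{word}'
--             if (len(group_name) + len(word) + len(ellipsis_value)) >= group_max_length:
--                 group_name = f'{group_name}{ellipsis_value}'
--                 group_name = group_name.lstrip(' ')
--                 break
--             group_name += f' {word}'
--     return group_name
-- ===== SOURCE B (Python) =====
-- from typing import Optional
--
--
-- def safe_group_name(
--     group_name: str, group_max_length: Optional[int] = 100, ellipsis: Optional[bool] = True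
-- ) -> str:
--     """Truncate group name on a word boundary, via a prefix-length table.
--
--     Instead of growing the result string word by word, compute the cumulative
--     length table lens (lens[i] = len of ' '-joined first i words plus one
--     leading space), find the first index j where the truncated name would
--     reach the limit, and build the result in one join.
--     """
--     ellipsis_value = ' ...' if ellipsis else ''
--     if group_name is not None and len(group_name) > group_max_length:
--         words = group_name.split(' ')
--         lens = [0]
--         for w in words:
--             lens.append(lens[-1] + 1 + len(w))
--         j = next(i for i, w in enumerate(words)
--                  if lens[i] + len(w) + len(ellipsis_value) >= group_max_length)
--         group_name = (' '.join(words[:j]) + ellipsis_value).lstrip(' ')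
--     return group_name
-- ===== Notes on version B (the rewrite author's own statement) =====
-- stated objective: alternative
-- what changed: B replaces A's word-by-word string accumulation with an in-loop break by a cumulative prefix-length table, a single scan for the break index, and one slice-and-join to build the result.
import Mathlib
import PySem

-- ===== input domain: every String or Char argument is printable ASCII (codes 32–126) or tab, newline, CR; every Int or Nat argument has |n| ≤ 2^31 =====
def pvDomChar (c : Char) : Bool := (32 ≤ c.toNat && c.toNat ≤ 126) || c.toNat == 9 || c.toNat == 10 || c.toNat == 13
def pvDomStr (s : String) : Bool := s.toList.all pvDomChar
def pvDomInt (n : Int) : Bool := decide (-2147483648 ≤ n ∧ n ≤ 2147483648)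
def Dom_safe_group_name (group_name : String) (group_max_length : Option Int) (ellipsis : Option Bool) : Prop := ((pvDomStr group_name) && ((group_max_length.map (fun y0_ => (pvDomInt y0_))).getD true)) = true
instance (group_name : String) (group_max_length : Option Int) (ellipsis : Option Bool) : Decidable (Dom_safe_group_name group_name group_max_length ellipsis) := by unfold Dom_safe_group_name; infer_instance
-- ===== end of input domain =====

-- B replaces A's word-by-word string growing with a prefix-length table + one take/join (objective: alternative; same cost).

-- ===== PORT A =====
-- A's for-loop over the words with its break; Python's lstrip(' ') is ported by
-- hand as List.dropWhile (· == ' ') — exact: it strips leading ' ' only.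
def sgnLoopA (ell : List Char) (m : Int) : List Char → List (List Char) → List Char
  | acc, [] => acc
  | acc, w :: ws =>
    if m ≤ ((acc.length + w.length + ell.length : Nat) : Int) then
      (acc ++ ell).dropWhile (· == ' ')
    else sgnLoopA ell m (acc ++ ' ' :: w) ws

def safe_group_name (group_name : String) (group_max_length : Option Int) (ellipsis : Option Bool) : String :=
  let ellipsis_value : List Char := if ellipsis = some true then [' ', '.', '.', '.'] else []
  match group_max_length with
  | none => group_name   -- Python raises TypeError here (len(...) > None); excluded by Pre_
  | some m =>
    if m < (group_name.toList.length : Int) then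
      String.mk (sgnLoopA ellipsis_value m [] (PySem.Chars.splitOn group_name.toList [' ']))
    else group_name

-- ===== PORT B =====
def safe_group_name_alt (group_name : String) (group_max_length : Option Int) (ellipsis : Option Bool) : String :=
  let ellipsis_value : List Char := if ellipsis = some true then [' ', '.', '.', '.'] else []
  match group_max_length with
  | none => group_name   -- Python raises TypeError here (len(...) > None); excluded by Pre_
  | some m =>
    if m < (group_name.toList.length : Int) then
      let words := PySem.Chars.splitOn group_name.toList [' ']
      -- lens = [0]; for w in words: lens.append(lens[-1] + 1 + len(w))
      let lens : List Int := words.scanl (fun L w => L + (1 + (w.length : Int))) 0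
      -- j = next(i for i, w in enumerate(words) if lens[i] + len(w) + len(ellipsis_value) >= group_max_length)
      let j := (lens.zip words).findIdx
        (fun Lw => decide (m ≤ Lw.1 + ((Lw.2.length + ellipsis_value.length : Nat) : Int)))
      String.mk ((PySem.Chars.join [' '] (words.take j) ++ ellipsis_value).dropWhile (· == ' '))
    else group_name

-- ===== PRECONDITION & SPEC =====
-- Pre_ excludes only group_max_length = None, on which Python A raises TypeError ('>' between int and NoneType).
def Pre_safe_group_name (group_name : String) (group_max_length : Option Int) (ellipsis : Option Bool) : Prop := group_max_length ≠ none
instance (group_name : String) (group_max_length : Option Int) (ellipsis : Option Bool) : Decidable (Pre_safe_group_name group_name group_max_length ellipsis) := by unfold Pre_safe_group_name; infer_instance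
def pvWitness_safe_group_name : String × Option Int × Option Bool := ("a few words here", some 9, some true)

def Spec_safe_group_name (group_name : String) (group_max_length : Option Int) (ellipsis : Option Bool) (out : String) : Prop := out = safe_group_name_alt group_name group_max_length ellipsis
instance (group_name : String) (group_max_length : Option Int) (ellipsis : Option Bool) (out : String) : Decidable (Spec_safe_group_name group_name group_max_length ellipsis out) := by unfold Spec_safe_group_name; infer_instance

-- ===== CLAIM (what is proved, stated in full; the proofs are below) =====
def Claim_equal_safe_group_name : Prop := ∀ (group_name : String) (group_max_length : Option Int) (ellipsis : Option Bool), Dom_safe_group_name group_name group_max_length ellipsis → Pre_safe_group_name group_name group_max_length ellipsis → Spec_safe_group_name group_name group_max_length ellipsis (safe_group_name group_name group_max_length ellipsis)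

-- ===== LEMMAS AND PROOFS =====

-- the first index at which A's loop breaks (and B's generator stops), with running length L
def sgnFindJ (elen : Nat) (m : Int) : Int → List (List Char) → Nat
  | _, [] => 0
  | L, w :: ws => if m ≤ L + ((w.length + elen : Nat) : Int) then 0
                  else sgnFindJ elen m (L + (1 + (w.length : Int))) ws + 1

-- the characters A's loop appends for a list of words: ' w1 w2 …'
def sgnFlat (ws : List (List Char)) : List Char := ws.flatMap (fun w => ' ' :: w)

theorem sgnFlat_cons (w : List Char) (t : List (List Char)) :
    sgnFlat (w :: t) = ' ' :: PySem.Chars.join [' '] (w :: t) := by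
  induction t generalizing w with
  | nil => simp [sgnFlat, PySem.Chars.join, List.intercalate, List.intersperse]
  | cons u t ih =>
    have h := ih u
    simp only [sgnFlat, List.flatMap_cons] at h ⊢
    rw [PySem.Chars.join_cons_cons]
    simp [h]

theorem sgnFindJ_lt (elen : Nat) (m : Int) : ∀ (ws : List (List Char)) (L : Int), ws ≠ [] →
    m ≤ L + ((sgnFlat ws).length : Int) - 1 + (elen : Int) → sgnFindJ elen m L ws < ws.length := by
  intro ws
  induction ws with
  | nil => intro L h; exact absurd rfl h
  | cons w t ih =>
    intro L _ hm
    by_cases hc : m ≤ L + ((w.length + elen : Nat) : Int)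
    · simp only [sgnFindJ, if_pos hc, List.length_cons]; omega
    · have ht : t ≠ [] := by
        rintro rfl
        apply hc
        simp only [sgnFlat, List.flatMap_cons, List.flatMap_nil, List.append_nil,
          List.length_cons] at hm
        push_cast at hm ⊢; omega
      have hstep : m ≤ (L + (1 + (w.length : Int))) + ((sgnFlat t).length : Int) - 1 + (elen : Int) := by
        have hl : (sgnFlat (w :: t)).length = 1 + w.length + (sgnFlat t).length := by
          simp [sgnFlat]; omega
        rw [hl] at hm; push_cast at hm ⊢; omega
      have := ih (L + (1 + (w.length : Int))) ht hstep
      simp only [sgnFindJ, if_neg hc, List.length_cons]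
      omega

theorem sgnLoopA_eq (ell : List Char) (m : Int) :
    ∀ (ws : List (List Char)) (acc : List Char),
      sgnFindJ ell.length m (acc.length : Int) ws < ws.length →
      sgnLoopA ell m acc ws =
        (acc ++ sgnFlat (ws.take (sgnFindJ ell.length m (acc.length : Int) ws)) ++ ell).dropWhile (· == ' ') := by
  intro ws
  induction ws with
  | nil => intro acc h; simp at h
  | cons w t ih =>
    intro acc hfound
    by_cases hcJ : m ≤ (acc.length : Int) + ((w.length : Int) + (ell.length : Int))
    · have hc : m ≤ (acc.length : Int) + (w.length : Int) + (ell.length : Int) := by omega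
      simp [sgnLoopA, sgnFindJ, hc, hcJ, sgnFlat]
    · have hc : ¬ m ≤ (acc.length : Int) + (w.length : Int) + (ell.length : Int) := by omega
      have hlen : (((acc ++ ' ' :: w).length : Nat) : Int) = (acc.length : Int) + (1 + (w.length : Int)) := by
        push_cast [List.length_append, List.length_cons]; omega
      simp only [List.length_cons] at hfound
      simp [sgnFindJ, hcJ] at hfound
      have hfound' : sgnFindJ ell.length m (((acc ++ ' ' :: w).length : Nat) : Int) t < t.length := by
        rw [hlen]; omega
      have hrec := ih (acc ++ ' ' :: w) hfound'
      rw [hlen] at hrec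
      simp [sgnLoopA, sgnFindJ, hc, hcJ, hrec, sgnFlat, List.append_assoc]

theorem scan_findIdx (elen : Nat) (m : Int) : ∀ (ws : List (List Char)) (L : Int),
    ((ws.scanl (fun L w => L + (1 + (w.length : Int))) L).zip ws).findIdx
        (fun Lw => decide (m ≤ Lw.1 + ((Lw.2.length + elen : Nat) : Int)))
      = sgnFindJ elen m L ws := by
  intro ws
  induction ws with
  | nil => intro L; simp [sgnFindJ]
  | cons w t ih =>
    intro L
    simp only [List.scanl_cons, List.zip_cons_cons, List.findIdx_cons, sgnFindJ]
    by_cases hc : m ≤ L + ((w.length + elen : Nat) : Int)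
    · have hc' : m ≤ L + ((w.length : Int) + (elen : Int)) := by push_cast at hc ⊢; omega
      simp [hc, hc']
    · have hc' : ¬ m ≤ L + ((w.length : Int) + (elen : Int)) := by push_cast at hc ⊢; omega
      simp [hc, hc']
      simpa using ih _

theorem intercalate_merge (sep a b : List Char) :
    ∀ (X : List (List Char)),
      List.intercalate sep (X ++ [a, b]) = List.intercalate sep (X ++ [a ++ sep ++ b]) := by
  intro X
  induction X with
  | nil => simp [List.intercalate, List.intersperse, List.append_assoc]
  | cons x X ih =>
    cases X with
    | nil => simp [List.intercalate, List.intersperse, List.append_assoc]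
    | cons y Y =>
      have h1 : List.intercalate sep (x :: y :: (Y ++ [a, b]))
          = x ++ sep ++ List.intercalate sep (y :: (Y ++ [a, b])) := by
        simp [List.intercalate, List.intersperse]
      have h2 : List.intercalate sep (x :: y :: (Y ++ [a ++ sep ++ b]))
          = x ++ sep ++ List.intercalate sep (y :: (Y ++ [a ++ sep ++ b])) := by
        simp [List.intercalate, List.intersperse]
      simp only [List.cons_append] at ih ⊢
      rw [h1, h2, ih]

theorem go_join (fuel : Nat) : ∀ (l cur : List Char) (acc : List (List Char)),
    List.intercalate [' '] (PySem.Chars.splitOn.go [' '] fuel l cur acc)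
      = List.intercalate [' '] (acc.reverse ++ [cur.reverse ++ l]) := by
  induction fuel with
  | zero => intro l cur acc; simp [PySem.Chars.splitOn.go]
  | succ fuel ih =>
    intro l cur acc
    cases l with
    | nil => simp [PySem.Chars.splitOn.go]
    | cons c rest =>
      rw [PySem.Chars.splitOn.go]
      by_cases hp : [' '].isPrefixOf (c :: rest) = true
      · have hc : c = ' ' := by
          simp [List.isPrefixOf] at hp; exact hp.symm
        simp only [if_pos hp, List.length_cons, List.length_nil, List.drop_succ_cons,
          List.drop_zero, ih, List.reverse_cons]
        have hmerge := intercalate_merge [' '] cur.reverse rest acc.reverse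
        subst hc
        simp only [List.append_assoc] at hmerge ⊢
        simpa using hmerge
      · simp only [if_neg hp, ih, List.reverse_cons]
        simp [List.append_assoc]

theorem go_ne_nil (sep : List Char) (fuel : Nat) :
    ∀ (l cur : List Char) (acc : List (List Char)),
      PySem.Chars.splitOn.go sep fuel l cur acc ≠ [] := by
  induction fuel with
  | zero => intro l cur acc; simp [PySem.Chars.splitOn.go]
  | succ fuel ih =>
    intro l cur acc
    cases l with
    | nil => simp [PySem.Chars.splitOn.go]
    | cons c rest =>
      rw [PySem.Chars.splitOn.go]
      by_cases hp : sep.isPrefixOf (c :: rest) = true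
      · simp only [if_pos hp]; exact ih _ _ _
      · simp only [if_neg hp]; exact ih _ _ _

theorem splitOn_join (s : List Char) :
    PySem.Chars.join [' '] (PySem.Chars.splitOn s [' ']) = s := by
  show List.intercalate _ _ = s
  rw [PySem.Chars.splitOn, go_join]
  simp [List.intercalate, List.intersperse]

theorem splitOn_ne_nil (s : List Char) : PySem.Chars.splitOn s [' '] ≠ [] :=
  go_ne_nil _ _ _ _ _

theorem dropWhile_flat (ell : List Char) (xs : List (List Char)) :
    (sgnFlat xs ++ ell).dropWhile (· == ' ')
      = (PySem.Chars.join [' '] xs ++ ell).dropWhile (· == ' ') := by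
  cases xs with
  | nil => simp [sgnFlat, PySem.Chars.join, List.intercalate, List.intersperse]
  | cons w t => rw [sgnFlat_cons]; simp

-- ===== VERDICT (by name: the statement is the Claim_ definition above) =====
theorem safe_group_name_spec : Claim_equal_safe_group_name := by
  intro group_name group_max_length ellipsis _ hpre
  unfold Spec_safe_group_name safe_group_name safe_group_name_alt
  cases group_max_length with
  | none => exact absurd rfl hpre
  | some m =>
    simp only []
    by_cases hlen : m < (group_name.toList.length : Int)
    · rw [if_pos hlen, if_pos hlen]
      set ell : List Char := if ellipsis = some true then [' ', '.', '.', '.'] else [] with hell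
      set cs := group_name.toList with hcs
      set words := PySem.Chars.splitOn cs [' '] with hwords
      have hne : words ≠ [] := splitOn_ne_nil cs
      have hjoin : PySem.Chars.join [' '] words = cs := splitOn_join cs
      have hflatlen : (sgnFlat words).length = cs.length + 1 := by
        cases hw : words with
        | nil => exact absurd hw hne
        | cons w t =>
          rw [hw] at hjoin
          rw [sgnFlat_cons, List.length_cons, hjoin]
      have hfound : sgnFindJ ell.length m 0 words < words.length := by
        apply sgnFindJ_lt _ _ _ _ hne
        rw [hflatlen]
        push_cast
        omega
      have hloop := sgnLoopA_eq ell m words []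
      simp only [List.length_nil, Nat.cast_zero] at hloop
      rw [hloop hfound, scan_findIdx]
      simp only [List.nil_append]
      rw [dropWhile_flat]
    · rw [if_neg hlen, if_neg hlen]
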